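-- pv_equiv track=rewrite | github.com/LuiisMarim/Simula-o-e-teste-de-software- | Lab04/src/case.py | analisar
-- ===== SOURCE A (Python) =====
-- def analisar(numeros: list) -> str:
--     total = 0
--     for n in numeros:
--         if n > 0 and n % 2 == 0:
--             total += n
--         elif n < 0:
--             total -= 1
--         else:
--             continue
--     if total > 10:
--         return "Acima"
--     return "Abaixo"
-- ===== SOURCE B (Python) =====
-- def analisar(numeros: list) -> str:
--     pos = sum(n for n in numeros if n > 0 and n % 2 == 0)
--     neg = sum(1 for n in numeros if n < 0)
--     total = pos - neg
--     return "Acima" if total > 10 else "Abaixo"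
-- ===== Notes on version B (the rewrite author's own statement) =====
-- stated objective: simpler
-- what changed: Replaces the single fused accumulator loop (branching per element) with two independent filtered aggregations: sum of even positives and count of negatives, combined once at the end.
import Mathlib
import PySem

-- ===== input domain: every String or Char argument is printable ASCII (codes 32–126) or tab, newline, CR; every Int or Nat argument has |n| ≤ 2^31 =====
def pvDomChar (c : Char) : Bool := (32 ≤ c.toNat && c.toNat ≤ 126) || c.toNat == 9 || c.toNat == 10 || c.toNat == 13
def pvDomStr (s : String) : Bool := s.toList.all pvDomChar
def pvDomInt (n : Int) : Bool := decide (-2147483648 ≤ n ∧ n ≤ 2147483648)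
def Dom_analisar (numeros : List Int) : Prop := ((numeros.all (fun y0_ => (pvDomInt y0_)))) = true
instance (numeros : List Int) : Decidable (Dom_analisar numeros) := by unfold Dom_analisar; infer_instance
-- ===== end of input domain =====

-- ===== PORT A =====
-- literal port of A's fused loop: one accumulator, branch per element
def analisar (numeros : List Int) : String :=
  let total := numeros.foldl (fun total n =>
    if n > 0 ∧ PySem.Int.mod n 2 = 0 then total + n
    else if n < 0 then total - 1
    else total) 0
  if total > 10 then "Acima" else "Abaixo"

-- ===== PORT B =====
-- B: two independent filtered aggregations, combined once
def analisar_alt (numeros : List Int) : String :=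
  let pos := ((numeros.filter (fun n => decide (n > 0) && decide (PySem.Int.mod n 2 = 0))).map id).sum
  let neg := ((numeros.filter (fun n => decide (n < 0))).map (fun _ => (1 : Int))).sum
  let total := pos - neg
  if total > 10 then "Acima" else "Abaixo"

-- ===== PRECONDITION & SPEC =====
def Spec_analisar (numeros : List Int) (out : String) : Prop := out = analisar_alt numeros
instance (numeros : List Int) (out : String) : Decidable (Spec_analisar numeros out) := by unfold Spec_analisar; infer_instance

-- ===== CLAIM (what is proved, stated in full; the proofs are below) =====
def Claim_equal_analisar : Prop := ∀ (numeros : List Int), Dom_analisar numeros → Spec_analisar numeros (analisar numeros)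

-- ===== LEMMAS AND PROOFS =====

theorem analisar_fold_eq (numeros : List Int) (acc : Int) :
    numeros.foldl (fun total n =>
      if n > 0 ∧ PySem.Int.mod n 2 = 0 then total + n
      else if n < 0 then total - 1
      else total) acc
    = acc + ((numeros.filter (fun n => decide (n > 0) && decide (PySem.Int.mod n 2 = 0))).map id).sum
          - ((numeros.filter (fun n => decide (n < 0))).map (fun _ => (1 : Int))).sum := by
  induction numeros generalizing acc with
  | nil => simp
  | cons x xs ih =>
    simp only [List.foldl_cons, List.filter_cons]
    by_cases h1 : x > 0 ∧ PySem.Int.mod x 2 = 0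
    · have hneg : ¬ x < 0 := by omega
      have hd : (2 : Int) ∣ x := (PySem.Int.mod_eq_zero_iff_dvd x 2).mp h1.2
      rw [if_pos h1, ih]
      simp [h1.1, hd, hneg]
      ring
    · have hnd : ¬ (0 < x ∧ (2 : Int) ∣ x) := by
        rintro ⟨ha, hb⟩
        exact h1 ⟨ha, (PySem.Int.mod_eq_zero_iff_dvd x 2).mpr hb⟩
      by_cases h2 : x < 0
      · rw [if_neg h1, if_pos h2, ih]
        simp [hnd, h2]
        ring
      · rw [if_neg h1, if_neg h2, ih]
        simp [hnd, h2]

-- ===== VERDICT (by name: the statement is the Claim_ definition above) =====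
theorem analisar_spec : Claim_equal_analisar := by
  intro numeros _
  unfold Spec_analisar analisar analisar_alt
  simp only [analisar_fold_eq, Int.zero_add]
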